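-- pv_equiv track=rewrite | github.com/posl/comment_recommendation | script/split_gen/5_time/en/240_D/8.py | solve
-- ===== SOURCE A (Python) =====
-- def solve(n, a):
--     ans = [0] * n
--     from collections import defaultdict
--     d = defaultdict(int)
--     for i in range(n):
--         ans[i] = i - d[a[i]]
--         d[a[i]] += 1
--     return ans
-- ===== SOURCE B (Python) =====
-- def solve(n, a):
--     ans = [0] * n
--     pos = {}
--     for i in range(n):
--         pos.setdefault(a[i], []).append(i)
--     for ps in pos.values():
--         for k, p in enumerate(ps):
--             ans[p] = p - k
--     return ans
-- ===== Notes on version B (the rewrite author's own statement) =====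
-- stated objective: alternative
-- what changed: Replaces A's single pass with a running per-value counter (defaultdict) by a two-phase computation: first group the indices of each value into a dict of position lists, then assign ans[p] = p - rank for each position p at occurrence rank k within its group.
import Mathlib
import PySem

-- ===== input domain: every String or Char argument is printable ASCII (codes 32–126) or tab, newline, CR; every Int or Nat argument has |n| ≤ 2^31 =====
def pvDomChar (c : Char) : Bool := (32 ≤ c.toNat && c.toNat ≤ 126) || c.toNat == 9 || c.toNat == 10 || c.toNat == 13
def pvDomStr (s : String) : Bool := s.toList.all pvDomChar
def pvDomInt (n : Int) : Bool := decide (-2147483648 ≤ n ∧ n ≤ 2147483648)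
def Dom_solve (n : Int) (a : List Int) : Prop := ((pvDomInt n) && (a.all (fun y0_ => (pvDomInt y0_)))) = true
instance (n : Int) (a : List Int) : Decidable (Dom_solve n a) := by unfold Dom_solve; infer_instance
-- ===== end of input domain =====

-- B replaces A's single pass with a running per-value counter by a two-phase computation:
-- group the indices of each value into a dict of position lists, then assign ans[p] = p - rank
-- per group (alternative decomposition, same O(n) cost).

-- ===== PORT A =====
-- literal port of A: ans = [0]*n; running defaultdict(int) d; for i in range(n): ans[i] = i - d[a[i]]; d[a[i]] += 1.
-- (the '.getD 0' after pyGet? is unreachable inside Pre_solve, where a[i] never raises)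
def solve (n : Int) (a : List Int) : List Int :=
  let ans : List Int := PySem.List.pyRepeat [0] n
  let st := (PySem.List.pyRange 0 n 1).foldl
    (fun (st : List Int × PySem.Dict Int Int) i =>
      let v := (PySem.List.pyGet? a i).getD 0
      let c := st.2.getD v 0
      (st.1.set i.toNat (i - c), st.2.insert v (c + 1)))
    (ans, PySem.Dict.empty)
  st.1

-- ===== PORT B =====
-- literal port of B: ans = [0]*n; pos = {}; for i in range(n): pos.setdefault(a[i], []).append(i)
-- (= Dict.modify with default [], appending i); then for ps in pos.values(): for k, p in
-- enumerate(ps): ans[p] = p - k.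
def solve_alt (n : Int) (a : List Int) : List Int :=
  let ans : List Int := PySem.List.pyRepeat [0] n
  let pos : PySem.Dict Int (List Int) :=
    (PySem.List.pyRange 0 n 1).foldl
      (fun d i => d.modify ((PySem.List.pyGet? a i).getD 0) [] (· ++ [i]))
      PySem.Dict.empty
  pos.values.foldl
    (fun ans ps =>
      (PySem.List.enumerate ps 0).foldl
        (fun ans kp => ans.set kp.2.toNat (kp.2 - kp.1)) ans)
    ans

-- ===== PRECONDITION & SPEC =====
-- Pre_ excludes exactly the inputs with n > len(a), where A (and B) raise IndexError on a[i].
def Pre_solve (n : Int) (a : List Int) : Prop := n ≤ (a.length : Int)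
instance (n : Int) (a : List Int) : Decidable (Pre_solve n a) := by unfold Pre_solve; infer_instance
def pvWitness_solve : Int × List Int := (3, [1, 2, 1])

def Spec_solve (n : Int) (a : List Int) (out : List Int) : Prop := out = solve_alt n a
instance (n : Int) (a : List Int) (out : List Int) : Decidable (Spec_solve n a out) := by unfold Spec_solve; infer_instance

-- ===== CLAIM (what is proved, stated in full; the proofs are below) =====
def Claim_equal_solve : Prop := ∀ (n : Int) (a : List Int), Dom_solve n a → Pre_solve n a → Spec_solve n a (solve n a)

-- ===== LEMMAS AND PROOFS =====

-- the common value both programs compute at position j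
def pvModel (a : List Int) (j : Nat) : Int := (j : Int) - (((a.take j).count (a.getD j 0) : Nat) : Int)

-- the (increasing) list of positions of value v among the first N entries of a
def pvQ (a : List Int) (N : Nat) (v : Int) : List Nat :=
  (List.range N).filter (fun j => a.getD j 0 == v)

-- setting one position of a mapped range is mapping a pointwise-updated function
theorem pv_set_map_range {α : Type} (N j : Nat) (f : Nat → α) (v : α) :
    ((List.range N).map f).set j v = (List.range N).map (fun k => if k = j then v else f k) := by
  apply List.ext_getElem
  · simp
  · intro k hk _
    rw [List.length_set, List.length_map, List.length_range] at hk
    simp only [List.getElem_set, List.getElem_map, List.getElem_range]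
    rcases eq_or_ne j k with h | h
    · simp [h]
    · simp [h, h.symm]

-- ===== A-side: the loop invariant of A =====
-- after m iterations the first m answers are the model values and the dict is the counter of a.take m
theorem pv_A_loop (a : List Int) (N : Nat) (hN : N ≤ a.length) :
    ∀ m : Nat, m ≤ N →
    ((List.range m).map (fun (k : Nat) => (k : Int))).foldl
      (fun (st : List Int × PySem.Dict Int Int) i =>
        let v := (PySem.List.pyGet? a i).getD 0
        let c := st.2.getD v 0
        (st.1.set i.toNat (i - c), st.2.insert v (c + 1)))
      (List.replicate N (0 : Int), PySem.Dict.empty)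
    = ((List.range N).map (fun j => if j < m then pvModel a j else 0),
       (a.take m).foldl (fun d x => d.insert x (d.getD x 0 + 1)) PySem.Dict.empty) := by
  intro m
  induction m with
  | zero =>
      intro _
      simp [List.map_const']
  | succ m ih =>
      intro hm
      have hmN : m < N := by omega
      have hma : m < a.length := by omega
      rw [List.range_succ, List.map_append, List.foldl_append, ih (by omega)]
      simp only [List.map_cons, List.map_nil, List.foldl_cons, List.foldl_nil]
      have hv : (PySem.List.pyGet? a ((m : Nat) : Int)).getD 0 = a.getD m 0 := by
        simp [List.getElem?_eq_getElem hma, List.getD_eq_getElem?_getD]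
      have hc : ((a.take m).foldl (fun d x => d.insert x (d.getD x 0 + 1))
          (PySem.Dict.empty : PySem.Dict Int Int)).getD (a.getD m 0) 0
          = ((a.take m).count (a.getD m 0) : Int) := by
        rw [PySem.Dict.getD_foldl_insert_add_one]
        simp [pysem]
      have htake : a.take (m + 1) = a.take m ++ [a.getD m 0] := by
        rw [List.take_add_one, List.getElem?_eq_getElem hma]
        simp [List.getD_eq_getElem?_getD, List.getElem?_eq_getElem hma]
      simp only [Prod.mk.injEq]
      refine ⟨?_, ?_⟩
      · -- answer component
        rw [hv, hc]
        rw [Int.toNat_natCast]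
        rw [pv_set_map_range N m]
        apply List.map_congr_left
        intro k hk
        rw [List.mem_range] at hk
        by_cases hkm : k = m
        · subst hkm
          simp [pvModel]
        · have : (k < m + 1) ↔ (k < m) := by omega
          simp [hkm, this]
      · -- dict component
        rw [hv, htake, List.foldl_append]
        simp only [List.foldl_cons, List.foldl_nil, List.getD_eq_getElem?_getD]

-- ===== B-side lemmas =====

-- one group: folding the enumerated position list writes p - rank at each position p
theorem pv_inner (N : Nat) (f : Nat → Int) (qs : List Nat) (hnd : qs.Nodup) :
    (PySem.List.enumerate (qs.map (fun (j : Nat) => (j : Int))) 0).foldl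
      (fun ans kp => ans.set kp.2.toNat (kp.2 - kp.1)) ((List.range N).map f)
    = (List.range N).map (fun j => if j ∈ qs then (j : Int) - (qs.idxOf j : Int) else f j) := by
  induction qs using List.reverseRecOn with
  | nil => simp
  | append_singleton qs q ih =>
      rw [List.nodup_append] at hnd
      obtain ⟨hqs, -, hq⟩ := hnd
      have hqmem : q ∉ qs := fun hmem => (hq q hmem q (List.mem_singleton_self q)) rfl
      rw [List.map_append, PySem.List.enumerate_append, List.foldl_append, ih hqs]
      simp only [List.map_cons, List.map_nil, PySem.List.enumerate_cons, PySem.List.enumerate_nil,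
        List.foldl_cons, List.foldl_nil, List.length_map]
      rw [Int.toNat_natCast, pv_set_map_range N q]
      apply List.map_congr_left
      intro k hk
      rw [List.mem_range] at hk
      by_cases hkq : k = q
      · subst hkq
        rw [List.idxOf_append_of_notMem hqmem]
        simp [hqmem]
      · by_cases hkqs : k ∈ qs
        · rw [List.idxOf_append_of_mem hkqs]
          simp [hkq, hkqs]
        · simp [hkq, hkqs]

-- the k-th position of value v has exactly k earlier occurrences
theorem pv_rank (p : Nat → Bool) (N j : Nat) (hj : j ∈ (List.range N).filter p) :
    ((List.range N).filter p).idxOf j = ((List.range j).filter p).length := by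
  rw [List.mem_filter, List.mem_range] at hj
  obtain ⟨hjN, hpj⟩ := hj
  have hsplit : N = j + (N - j) := by omega
  rw [hsplit, List.range_add, List.filter_append]
  have hnot : j ∉ (List.range j).filter p := by
    intro hmem
    rw [List.mem_filter, List.mem_range] at hmem
    omega
  rw [List.idxOf_append_of_notMem hnot]
  have h1 : N - j = (N - j - 1) + 1 := by omega
  rw [h1, List.range_succ_eq_map, List.map_cons]
  simp [hpj]

-- a.take j as a mapped range
theorem pv_take_eq_map_range (a : List Int) (j : Nat) (hj : j ≤ a.length) :
    a.take j = (List.range j).map (fun t => a.getD t 0) := by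
  apply List.ext_getElem
  · simp; omega
  · intro k hk _
    rw [List.length_take] at hk
    have hk' : k < a.length := by omega
    simp [List.getElem_take, List.getD_eq_getElem?_getD, List.getElem?_eq_getElem hk']

-- count over a prefix = number of earlier positions with that value
theorem pv_count (a : List Int) (v : Int) (j : Nat) (hj : j ≤ a.length) :
    (a.take j).count v = ((List.range j).filter (fun t => a.getD t 0 == v)).length := by
  rw [pv_take_eq_map_range a j hj, List.countP_eq_length_filter.symm]
  simp [List.count, List.countP_map, Function.comp_def]

-- the outer fold over the groups of a list of keys
theorem pv_outer (a : List Int) (N : Nat) (hN : N ≤ a.length) (K : List Int) :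
    K.foldl (fun ans v =>
        (PySem.List.enumerate ((pvQ a N v).map (fun (j : Nat) => (j : Int))) 0).foldl
          (fun ans kp => ans.set kp.2.toNat (kp.2 - kp.1)) ans)
      ((List.range N).map (fun _ => (0 : Int)))
    = (List.range N).map (fun j => if (a.getD j 0) ∈ K then pvModel a j else 0) := by
  induction K using List.reverseRecOn with
  | nil => simp
  | append_singleton K v ih =>
      rw [List.foldl_append, ih]
      simp only [List.foldl_cons, List.foldl_nil]
      rw [pv_inner N _ (pvQ a N v) ((List.nodup_range).filter _)]
      apply List.map_congr_left
      intro j hj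
      rw [List.mem_range] at hj
      by_cases hv : a.getD j 0 = v
      · have hjq : j ∈ pvQ a N v := by
          simp only [pvQ, List.mem_filter, List.mem_range]
          exact ⟨hj, by rw [hv]; simp⟩
        rw [if_pos hjq]
        simp only [pvQ] at hjq ⊢
        rw [pv_rank _ N j hjq, ← pv_count a v j (by omega)]
        simp only [pvModel, hv]
        rw [if_pos (List.mem_append_right K (List.mem_singleton_self v))]
      · have hjq : j ∉ pvQ a N v := by
          simp only [pvQ, List.mem_filter, List.mem_range]
          rintro ⟨-, hbeq⟩
          exact hv (beq_iff_eq.mp hbeq)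
        rw [if_neg hjq]
        by_cases hK : a.getD j 0 ∈ K
        · rw [if_pos hK, if_pos (List.mem_append_left [v] hK)]
        · rw [if_neg hK, if_neg (fun hmem => (List.mem_append.mp hmem).elim hK
            (fun h1 => hv (List.mem_singleton.mp h1)))]

-- evaluating B: the grouped dict, read back through values, yields the model
theorem pv_B_eval (n : Int) (a : List Int) (hN : n.toNat ≤ a.length) :
    solve_alt n a = (List.range n.toNat).map (pvModel a) := by
  unfold solve_alt
  dsimp only
  rw [PySem.List.pyRepeat_singleton, PySem.List.pyRange_zero]
  rw [← List.foldl_map (f := fun i => ((PySem.List.pyGet? a i).getD 0, i))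
    (g := fun (d : PySem.Dict Int (List Int)) p => d.modify p.1 [] (· ++ [p.2]))]
  have hnodup : ((((List.range n.toNat).map (fun (k : Nat) => (k : Int))).map
      (fun i => ((PySem.List.pyGet? a i).getD 0, i))).foldl
      (fun (d : PySem.Dict Int (List Int)) p => d.modify p.1 [] (· ++ [p.2]))
      PySem.Dict.empty).keys.Nodup :=
    PySem.Dict.nodup_keys_foldl_modify_key _ _ _ _ _ PySem.Dict.nodup_keys_empty
  rw [PySem.Dict.values_eq_map_keys _ hnodup []]
  rw [PySem.Dict.keys_foldl_modify_key]
  have hkeys : ((((List.range n.toNat).map (fun (k : Nat) => (k : Int))).map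
      (fun i => ((PySem.List.pyGet? a i).getD 0, i))).map Prod.fst)
      = (List.range n.toNat).map (fun j => a.getD j 0) := by
    simp [List.map_map, Function.comp_def, List.getD_eq_getElem?_getD]
  rw [hkeys]
  have hgroup : ∀ v : Int,
      (((((List.range n.toNat).map (fun (k : Nat) => (k : Int))).map
        (fun i => ((PySem.List.pyGet? a i).getD 0, i))).foldl
        (fun (d : PySem.Dict Int (List Int)) p => d.modify p.1 [] (· ++ [p.2]))
        PySem.Dict.empty).getD v [])
      = (pvQ a n.toNat v).map (fun (j : Nat) => (j : Int)) := by
    intro v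
    rw [PySem.Dict.getD_foldl_modify_append]
    rw [PySem.Dict.getD_empty, List.nil_append]
    rw [List.map_map, List.filter_map, List.map_map]
    simp only [pvQ, Function.comp_def]
    refine congrArg _ (List.filter_congr fun x hx => ?_)
    simp [List.getD_eq_getElem?_getD]
  simp only [hgroup]
  rw [List.foldl_map]
  have hbase : (List.replicate n.toNat (0 : Int)) = (List.range n.toNat).map (fun _ => (0 : Int)) := by
    simp [List.map_const']
  rw [hbase, pv_outer a n.toNat hN]
  apply List.map_congr_left
  intro j hj
  rw [List.mem_range] at hj
  have hmem : a.getD j 0 ∈ PySem.Set.update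
      (PySem.Dict.empty : PySem.Dict Int (List Int)).keys
      ((List.range n.toNat).map (fun j => a.getD j 0)) := by
    show a.getD j 0 ∈ PySem.Set.ofList ((List.range n.toNat).map (fun j => a.getD j 0))
    rw [PySem.Set.mem_ofList]
    exact List.mem_map.mpr ⟨j, List.mem_range.mpr hj, rfl⟩
  rw [if_pos hmem]

-- ===== VERDICT (by name: the statement is the Claim_ definition above) =====
theorem solve_spec : Claim_equal_solve := by
  intro n a _hdom hpre
  unfold Spec_solve
  have hN : n.toNat ≤ a.length := by
    unfold Pre_solve at hpre; omega
  unfold solve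
  dsimp only
  rw [PySem.List.pyRepeat_singleton, PySem.List.pyRange_zero,
    pv_A_loop a n.toNat hN n.toNat le_rfl, pv_B_eval n a hN]
  apply List.map_congr_left
  intro k hk
  rw [List.mem_range] at hk
  simp [hk]
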